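-- pv_equiv track=rewrite | github.com/shiranAharoni/python-algorithms-practice | arrays/Subarrays_with_Given_Sum_and_Bounded_Maximum.py | countSubarraysWithSumAndMaxAtMost
-- ===== SOURCE A (Python) =====
-- def countSubarraysWithSumAndMaxAtMost(nums, k, M):
--     counter = 0
--     n = len(nums)
--
--     for i in range(n):
--         cur_sum = 0
--         j = i
--         while (j < n and nums[j] <= M ):
--             cur_sum += nums[j]
--             if cur_sum == k:
--                 counter += 1
--             j += 1
--
--     return counter
-- ===== SOURCE B (Python) =====
-- def countSubarraysWithSumAndMaxAtMost(nums, k, M):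
--     counter = 0
--     prefix_counts = {0: 1}
--     cur_sum = 0
--     for x in nums:
--         if x > M:
--             prefix_counts = {0: 1}
--             cur_sum = 0
--         else:
--             cur_sum += x
--             counter += prefix_counts.get(cur_sum - k, 0)
--             prefix_counts[cur_sum] = prefix_counts.get(cur_sum, 0) + 1
--     return counter
-- ===== Notes on version B (the rewrite author's own statement) =====
-- stated objective: faster
-- what changed: Replaces the O(n^2) for-each-start rescan with a single left-to-right pass that resets at elements > M and counts subarrays ending at each position via a hashmap of prefix sums within the current segment.
import Mathlib
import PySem

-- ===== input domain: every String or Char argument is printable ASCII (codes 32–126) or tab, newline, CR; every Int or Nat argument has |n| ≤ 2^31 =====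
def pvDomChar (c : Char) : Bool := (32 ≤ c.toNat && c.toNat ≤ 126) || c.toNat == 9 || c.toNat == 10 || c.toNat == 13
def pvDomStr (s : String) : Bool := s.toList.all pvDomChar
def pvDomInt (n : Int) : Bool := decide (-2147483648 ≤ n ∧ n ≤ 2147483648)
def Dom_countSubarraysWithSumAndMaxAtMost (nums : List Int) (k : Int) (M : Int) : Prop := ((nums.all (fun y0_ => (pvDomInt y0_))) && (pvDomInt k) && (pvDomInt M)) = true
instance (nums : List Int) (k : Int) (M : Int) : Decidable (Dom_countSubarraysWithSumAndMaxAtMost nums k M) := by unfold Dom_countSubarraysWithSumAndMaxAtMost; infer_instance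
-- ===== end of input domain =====

-- B replaces A's per-start rescan by one left-to-right pass with a prefix-sum hashmap that is
-- reset at elements > M (objective: faster). Return values only; neither program mutates its input.

-- ===== PORT A =====
-- the inner `while (j < n and nums[j] <= M)` loop; fuel (n - j at entry) bounds the iterations.
-- nums.getD j 0 is Python's nums[j]: the guard j < n keeps the access in range, so the default
-- value is never read.
def aWhile (nums : List Int) (k M : Int) (n : Nat) : Nat → Nat → Int → Int → Int
  | 0, _, _, counter => counter
  | fuel+1, j, curSum, counter =>
    if j < n ∧ nums.getD j 0 ≤ M then
      aWhile nums k M n fuel (j+1) (curSum + nums.getD j 0)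
        (if curSum + nums.getD j 0 = k then counter + 1 else counter)
    else counter

def countSubarraysWithSumAndMaxAtMost (nums : List Int) (k : Int) (M : Int) : Int :=
  let n := nums.length
  (List.range n).foldl (fun counter i => aWhile nums k M n (n - i) i 0 counter) 0

-- ===== PORT B =====
-- one step of B's for-loop: state = (counter, prefix_counts, cur_sum)
def bStep (k M : Int) (st : Int × PySem.Dict Int Int × Int) (x : Int) : Int × PySem.Dict Int Int × Int :=
  if x > M then (st.1, PySem.Dict.empty.insert 0 1, 0)
  else
    (st.1 + st.2.1.getD (st.2.2 + x - k) 0,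
     st.2.1.insert (st.2.2 + x) (st.2.1.getD (st.2.2 + x) 0 + 1),
     st.2.2 + x)

def countSubarraysWithSumAndMaxAtMost_alt (nums : List Int) (k : Int) (M : Int) : Int :=
  (nums.foldl (bStep k M) (0, PySem.Dict.empty.insert 0 1, 0)).1

-- ===== PRECONDITION & SPEC =====
def Spec_countSubarraysWithSumAndMaxAtMost (nums : List Int) (k : Int) (M : Int) (out : Int) : Prop := out = countSubarraysWithSumAndMaxAtMost_alt nums k M
instance (nums : List Int) (k : Int) (M : Int) (out : Int) : Decidable (Spec_countSubarraysWithSumAndMaxAtMost nums k M out) := by unfold Spec_countSubarraysWithSumAndMaxAtMost; infer_instance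

-- ===== CLAIM (what is proved, stated in full; the proofs are below) =====
def Claim_equal_countSubarraysWithSumAndMaxAtMost : Prop := ∀ (nums : List Int) (k : Int) (M : Int), Dom_countSubarraysWithSumAndMaxAtMost nums k M → Spec_countSubarraysWithSumAndMaxAtMost nums k M (countSubarraysWithSumAndMaxAtMost nums k M)

-- ===== LEMMAS AND PROOFS =====

-- number of nonempty prefixes of l whose sum is t
def cntPref : List Int → Int → Int
  | [], _ => 0
  | x :: xs, t => (if x = t then 1 else 0) + cntPref xs (t - x)

-- A's total, start by start: for each suffix, count the k-sum prefixes inside its run of ≤ M elements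
def tCount (k M : Int) : List Int → Int
  | [] => 0
  | x :: xs => cntPref ((x :: xs).takeWhile (fun a => decide (a ≤ M))) k + tCount k M xs

-- the current segment: the longest suffix all of whose elements are ≤ M
def curSeg (M : Int) : List Int → List Int
  | [] => []
  | x :: xs => if (x :: xs).all (fun a => decide (a ≤ M)) then x :: xs else curSeg M xs

-- number of prefixes (by cut point 0..len) of seg with sum v — what B's dict stores
def pCount (seg : List Int) (v : Int) : Int :=
  ((List.range (seg.length + 1)).countP (fun t => decide ((seg.take t).sum = v)) : Int)

-- number of suffixes (by cut point) of seg with sum v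
def sCount (seg : List Int) (v : Int) : Int :=
  ((List.range (seg.length + 1)).countP (fun t => decide ((seg.drop t).sum = v)) : Int)

theorem curSeg_cons (M y : Int) (l : List Int) :
    curSeg M (y :: l) =
      if ((y :: l).all (fun a => decide (a ≤ M))) = true then y :: l else curSeg M l := rfl

theorem pCount_nil (v : Int) : pCount [] v = if v = 0 then 1 else 0 := by
  simp [pCount]
  split_ifs <;> simp_all

theorem pCount_snoc (seg : List Int) (x v : Int) :
    pCount (seg ++ [x]) v = pCount seg v + (if seg.sum + x = v then 1 else 0) := by
  unfold pCount
  rw [show (seg ++ [x]).length + 1 = (seg.length + 1) + 1 by simp]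
  rw [List.range_succ, List.countP_append]
  have h1 : (List.range (seg.length + 1)).countP
      (fun t => decide (((seg ++ [x]).take t).sum = v)) =
      (List.range (seg.length + 1)).countP (fun t => decide ((seg.take t).sum = v)) := by
    apply List.countP_congr
    intro t ht
    have : t ≤ seg.length := by
      have := List.mem_range.mp ht; omega
    rw [List.take_append_of_le_length this]
  rw [h1]
  have h2 : ((seg ++ [x]).take (seg.length + 1)).sum = seg.sum + x := by
    rw [List.take_of_length_le (by simp)]; simp
  by_cases h : seg.sum + x = v
  · simp [h2, h]
  · simp [h2, h]

theorem sCount_nil (v : Int) : sCount [] v = if v = 0 then 1 else 0 := by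
  simp [sCount]
  split_ifs <;> simp_all

theorem sCount_cons (y : Int) (l : List Int) (v : Int) :
    sCount (y :: l) v = (if y + l.sum = v then 1 else 0) + sCount l v := by
  unfold sCount
  rw [show (y :: l).length + 1 = (l.length + 1) + 1 by simp]
  rw [List.range_succ_eq_map]
  simp only [List.countP_cons, List.countP_map, List.drop_zero]
  have h : (List.range (l.length + 1)).countP
      ((fun t => decide (((y :: l).drop t).sum = v)) ∘ Nat.succ) =
      (List.range (l.length + 1)).countP (fun t => decide ((l.drop t).sum = v)) := by
    apply List.countP_congr
    intro t _
    simp [Function.comp, List.drop_succ_cons]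
  rw [h]
  by_cases hc : y + l.sum = v
  · simp [List.sum_cons, hc]; ring
  · simp [List.sum_cons, hc]

theorem pCount_eq_sCount (seg : List Int) (w : Int) :
    pCount seg (seg.sum - w) = sCount seg w := by
  unfold pCount sCount
  congr 1
  apply List.countP_congr
  intro t _
  have hsum : (seg.take t).sum + (seg.drop t).sum = seg.sum := by
    rw [← List.sum_append, List.take_append_drop]
  simp only [decide_eq_true_eq]
  omega

theorem curSeg_of_all (M : Int) (l : List Int) (h : l.all (fun a => decide (a ≤ M)) = true) :
    curSeg M l = l := by
  cases l with
  | nil => rfl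
  | cons x xs => rw [curSeg_cons, if_pos h]

theorem curSeg_snoc_le (M : Int) (l : List Int) (x : Int) (hx : x ≤ M) :
    curSeg M (l ++ [x]) = curSeg M l ++ [x] := by
  induction l with
  | nil => simp [curSeg, hx]
  | cons y l ih =>
      rw [List.cons_append, curSeg_cons, curSeg_cons M y l]
      by_cases hall : ((y :: l).all (fun a => decide (a ≤ M))) = true
      · rw [if_pos (by
            rw [show y :: (l ++ [x]) = (y :: l) ++ [x] from rfl, List.all_append]
            simp [hall, hx]), if_pos hall]
        rfl
      · rw [if_neg (by
            rw [show y :: (l ++ [x]) = (y :: l) ++ [x] from rfl, List.all_append]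
            simp [hall]), if_neg hall, ih]

theorem curSeg_snoc_gt (M : Int) (l : List Int) (x : Int) (hx : ¬ x ≤ M) :
    curSeg M (l ++ [x]) = [] := by
  induction l with
  | nil => simp [curSeg, hx]
  | cons y l ih =>
      rw [List.cons_append, curSeg_cons]
      rw [if_neg (by
        rw [show y :: (l ++ [x]) = (y :: l) ++ [x] from rfl, List.all_append]
        simp [hx])]
      exact ih

theorem cnt_takeWhile_snoc (M : Int) (l : List Int) (x : Int) : ∀ k : Int,
    cntPref ((l ++ [x]).takeWhile (fun a => decide (a ≤ M))) k =
    cntPref (l.takeWhile (fun a => decide (a ≤ M))) k +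
      (if (l.all (fun a => decide (a ≤ M))) = true ∧ x ≤ M ∧ l.sum + x = k then 1 else 0) := by
  induction l with
  | nil =>
      intro k
      by_cases hx : x ≤ M
      · simp [hx, cntPref]
      · simp [hx, cntPref]
  | cons y l ih =>
      intro k
      by_cases hy : y ≤ M
      · rw [List.cons_append, List.takeWhile_cons, if_pos (by simpa using hy),
            List.takeWhile_cons, if_pos (by simpa using hy)]
        simp only [cntPref]
        rw [ih (k - y)]
        have hiff : ((l.all (fun a => decide (a ≤ M))) = true ∧ x ≤ M ∧ l.sum + x = k - y)
            ↔ (((y :: l).all (fun a => decide (a ≤ M))) = true ∧ x ≤ M ∧ (y :: l).sum + x = k) := by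
          simp only [List.all_cons, List.sum_cons, Bool.and_eq_true, decide_eq_true_eq, hy, true_and]
          constructor
          · rintro ⟨a, b, c⟩; exact ⟨a, b, by omega⟩
          · rintro ⟨a, b, c⟩; exact ⟨a, b, by omega⟩
        rw [if_congr hiff rfl rfl]
        ring
      · rw [List.cons_append, List.takeWhile_cons, if_neg (by simpa using hy),
            List.takeWhile_cons, if_neg (by simpa using hy)]
        rw [if_neg (by simp [hy])]
        simp [cntPref]

theorem tCount_snoc (k M : Int) (l : List Int) (x : Int) :
    tCount k M (l ++ [x]) = tCount k M l +
      (if x ≤ M then sCount (curSeg M l) (k - x) else 0) := by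
  induction l with
  | nil =>
      by_cases hx : x ≤ M <;>
        simp [tCount, cntPref, sCount_nil, curSeg, hx] <;>
        split_ifs <;> omega
  | cons y l ih =>
      rw [List.cons_append]
      rw [show tCount k M (y :: (l ++ [x]))
            = cntPref ((y :: (l ++ [x])).takeWhile (fun a => decide (a ≤ M))) k
              + tCount k M (l ++ [x]) from rfl]
      rw [show tCount k M (y :: l)
            = cntPref ((y :: l).takeWhile (fun a => decide (a ≤ M))) k + tCount k M l from rfl]
      rw [ih]
      rw [show (y :: (l ++ [x])) = (y :: l) ++ [x] from rfl]
      rw [cnt_takeWhile_snoc M (y :: l) x k]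
      rw [curSeg_cons]
      by_cases hx : x ≤ M
      · rw [if_pos hx, if_pos hx]
        by_cases hall : ((y :: l).all (fun a => decide (a ≤ M))) = true
        · rw [if_pos hall]
          have hall' : (l.all (fun a => decide (a ≤ M))) = true := by
            simp only [List.all_cons, Bool.and_eq_true] at hall; exact hall.2
          rw [curSeg_of_all M l hall', sCount_cons]
          have hind : (if ((y :: l).all (fun a => decide (a ≤ M))) = true ∧ x ≤ M
                  ∧ (y :: l).sum + x = k then (1:Int) else 0)
               = (if y + l.sum = k - x then 1 else 0) := by
            simp only [hall, hx, List.sum_cons, true_and]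
            split_ifs <;> omega
          rw [hind]; ring
        · rw [if_neg hall, if_neg (by simp [hall])]
          ring
      · rw [if_neg hx, if_neg hx, if_neg (by tauto)]
        ring

-- ---- A equals tCount ----

theorem aWhile_eq (nums : List Int) (k M : Int) :
    ∀ (fuel j : Nat) (cs c : Int), nums.length ≤ j + fuel →
      aWhile nums k M nums.length fuel j cs c =
        c + cntPref ((nums.drop j).takeWhile (fun a => decide (a ≤ M))) (k - cs) := by
  intro fuel
  induction fuel with
  | zero =>
      intro j cs c h
      rw [List.drop_eq_nil_of_le (by omega)]
      simp [aWhile, cntPref]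
  | succ fuel ih =>
      intro j cs c h
      cases hd : nums.drop j with
      | nil =>
          have hj : nums.length ≤ j := List.drop_eq_nil_iff.mp hd
          simp [aWhile, cntPref, Nat.not_lt.mpr hj]
      | cons x rest =>
          have hj : j < nums.length := by
            have := congrArg List.length hd
            simp [List.length_drop] at this
            omega
          have hget : nums.getD j 0 = x := by
            have h1 : nums[j]? = some x := by
              have h2 : (List.drop j nums)[0]? = nums[j + 0]? := List.getElem?_drop
              rw [hd] at h2
              simpa using h2.symm
            simp [List.getD, h1]
          have hdrop1 : nums.drop (j + 1) = rest := by
            rw [← List.tail_drop, hd]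
            rfl
          by_cases hx : x ≤ M
          · simp only [aWhile, hget]
            rw [if_pos (show j < nums.length ∧ x ≤ M from ⟨hj, hx⟩)]
            rw [ih (j+1) (cs + x) _ (by omega), hdrop1]
            rw [List.takeWhile_cons, if_pos (show (decide (x ≤ M)) = true by simpa using hx)]
            simp only [cntPref]
            rw [show k - cs - x = k - (cs + x) by ring]
            split_ifs <;> omega
          · simp only [aWhile, hget]
            rw [if_neg (show ¬ (j < nums.length ∧ x ≤ M) by tauto)]
            rw [List.takeWhile_cons, if_neg (show ¬ (decide (x ≤ M)) = true by simpa using hx)]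
            simp [cntPref]

theorem sum_drop_eq_tCount (k M : Int) : ∀ l : List Int,
    ((List.range l.length).map (fun i =>
      cntPref ((l.drop i).takeWhile (fun a => decide (a ≤ M))) k)).sum = tCount k M l := by
  intro l
  induction l with
  | nil => simp [tCount]
  | cons x xs ih =>
      rw [show (x :: xs).length = xs.length + 1 from rfl, List.range_succ_eq_map]
      rw [List.map_cons, List.map_map, List.sum_cons]
      rw [show ((fun i => cntPref (((x :: xs).drop i).takeWhile (fun a => decide (a ≤ M))) k)
              ∘ Nat.succ)
            = (fun i => cntPref ((xs.drop i).takeWhile (fun a => decide (a ≤ M))) k) from by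
        funext i
        simp [Function.comp, List.drop_succ_cons]]
      rw [ih]
      simp [tCount]

theorem a_eq_tCount (nums : List Int) (k M : Int) :
    countSubarraysWithSumAndMaxAtMost nums k M = tCount k M nums := by
  have h0 : countSubarraysWithSumAndMaxAtMost nums k M
      = (List.range nums.length).foldl
          (fun counter i => aWhile nums k M nums.length (nums.length - i) i 0 counter) 0 := rfl
  rw [h0]
  have hfold : ∀ (l : List Nat) (c : Int), (∀ i ∈ l, i < nums.length) →
      l.foldl (fun counter i => aWhile nums k M nums.length (nums.length - i) i 0 counter) c =
      c + (l.map (fun i =>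
        cntPref ((nums.drop i).takeWhile (fun a => decide (a ≤ M))) k)).sum := by
    intro l
    induction l with
    | nil => intro c _; simp
    | cons i l ihl =>
        intro c hmem
        rw [List.foldl_cons, List.map_cons, List.sum_cons]
        rw [aWhile_eq nums k M (nums.length - i) i 0 c
          (by have := hmem i (by simp); omega)]
        rw [ihl _ (fun t ht => hmem t (by simp [ht]))]
        rw [sub_zero]
        ring
  rw [hfold _ 0 (fun i hi => List.mem_range.mp hi), zero_add, sum_drop_eq_tCount]

-- ---- B's loop invariant ----

theorem bInv (k M : Int) (l : List Int) :
    (l.foldl (bStep k M) (0, PySem.Dict.empty.insert 0 1, 0)).1 = tCount k M l ∧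
    (l.foldl (bStep k M) (0, PySem.Dict.empty.insert 0 1, 0)).2.2 = (curSeg M l).sum ∧
    ∀ v, (l.foldl (bStep k M) (0, PySem.Dict.empty.insert 0 1, 0)).2.1.getD v 0 =
      pCount (curSeg M l) v := by
  induction l using List.reverseRecOn with
  | nil =>
      refine ⟨rfl, rfl, ?_⟩
      intro v
      simp only [List.foldl_nil]
      rw [show curSeg M [] = [] from rfl, pCount_nil, PySem.Dict.getD_insert]
      simp [PySem.Dict.getD_empty]
  | append_singleton l x ih =>
      obtain ⟨ih1, ih2, ih3⟩ := ih
      rw [List.foldl_append, List.foldl_cons, List.foldl_nil]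
      set r : Int × PySem.Dict Int Int × Int :=
        List.foldl (bStep k M) (0, PySem.Dict.empty.insert 0 1, 0) l with hr
      obtain ⟨c, d, s⟩ := r
      simp only at ih1 ih2 ih3
      subst ih1
      subst ih2
      unfold bStep
      by_cases hx : x ≤ M
      · rw [if_neg (by omega)]
        have hseg := curSeg_snoc_le M l x hx
        refine ⟨?_, ?_, ?_⟩
        · show tCount k M l + d.getD ((curSeg M l).sum + x - k) 0 = tCount k M (l ++ [x])
          rw [ih3, tCount_snoc, if_pos hx]
          congr 1
          rw [show (curSeg M l).sum + x - k = (curSeg M l).sum - (k - x) by ring,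
              pCount_eq_sCount]
        · show (curSeg M l).sum + x = (curSeg M (l ++ [x])).sum
          rw [hseg, List.sum_append]
          simp
        · intro v
          show (d.insert ((curSeg M l).sum + x) (d.getD ((curSeg M l).sum + x) 0 + 1)).getD v 0
              = pCount (curSeg M (l ++ [x])) v
          rw [PySem.Dict.getD_insert, hseg, pCount_snoc, ih3, ih3]
          by_cases h1 : v = (curSeg M l).sum + x
          · subst h1; simp
          · rw [if_neg h1, if_neg (by omega)]
            ring
      · rw [if_pos (by omega)]
        have hseg := curSeg_snoc_gt M l x hx
        refine ⟨?_, ?_, ?_⟩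
        · show tCount k M l = tCount k M (l ++ [x])
          rw [tCount_snoc, if_neg hx]
          simp
        · show (0 : Int) = (curSeg M (l ++ [x])).sum
          rw [hseg]
          rfl
        · intro v
          show (PySem.Dict.empty.insert 0 1).getD v 0 = pCount (curSeg M (l ++ [x])) v
          rw [hseg, pCount_nil, PySem.Dict.getD_insert]
          simp [PySem.Dict.getD_empty]

theorem b_eq_tCount (nums : List Int) (k M : Int) :
    countSubarraysWithSumAndMaxAtMost_alt nums k M = tCount k M nums := by
  unfold countSubarraysWithSumAndMaxAtMost_alt
  exact (bInv k M nums).1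

-- ===== VERDICT (by name: the statement is the Claim_ definition above) =====
theorem countSubarraysWithSumAndMaxAtMost_spec : Claim_equal_countSubarraysWithSumAndMaxAtMost := by
  intro nums k M _
  unfold Spec_countSubarraysWithSumAndMaxAtMost
  rw [a_eq_tCount, b_eq_tCount]
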